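-- pv_equiv track=rewrite | github.com/deepinv/deepinv | deepinv/physics/functional/tiled_product_convolution.py | _find_containing_patches_1d
-- ===== SOURCE A (Python) =====
-- def _find_containing_patches_1d(
--     pos: int, n_min: int, n_max: int, stride: int, patch_size: int, max_size: int
-- ) -> tuple[list[int], list[int]]:
--     """Find patches containing a position along one dimension.
--
--     :param pos: Position coordinate.
--     :param n_min: Minimum patch index to check.
--     :param n_max: Maximum patch index to check.
--     :param stride: Stride between patches.
--     :param patch_size: Size of each patch.
--     :param max_size: Maximum valid coordinate.
--     :return: Tuple of (patch_indices, local_positions).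
--     """
--     indices = []
--     positions = []
--
--     for i in range(n_min, n_max + 1):
--         left = i * stride
--         right = left + patch_size
--
--         if left <= pos < right <= max_size:
--             indices.append(i)
--             positions.append(pos - i * stride)
--
--     return indices, positions
-- ===== SOURCE B (Python) =====
-- def _find_containing_patches_1d(
--     pos: int, n_min: int, n_max: int, stride: int, patch_size: int, max_size: int
-- ) -> tuple[list[int], list[int]]:
--     """Closed-form version: a patch i contains pos (with its right edge in
--     bounds) iff pos - patch_size < i*stride <= min(pos, max_size - patch_size),
--     so the qualifying indices form one contiguous interval, computed directly
--     by integer division instead of scanning n_min..n_max."""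
--     lo = max((pos - patch_size) // stride + 1, n_min)
--     hi = min(min(pos, max_size - patch_size) // stride, n_max)
--     indices = list(range(lo, hi + 1))
--     positions = [pos - i * stride for i in indices]
--     return indices, positions
-- ===== Notes on version B (the rewrite author's own statement) =====
-- stated objective: faster
-- what changed: Replaces the linear scan over all candidate indices n_min..n_max with a closed-form computation of the contiguous qualifying index interval via integer floor division; Pre_ restricts to positive stride, the natural domain of a patch stride (A still returns values for zero or negative stride, but those are outside the function's intended use).
-- outside the precondition, e.g. on _find_containing_patches_1d(-2, 0, 3, -1, 2, 10): A returns ([2, 3], [0, 1]), B returns ([], []); on _find_containing_patches_1d(5, 0, 10, 0, 4, 100): A returns ([], []), B raises ZeroDivisionError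
import Mathlib
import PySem

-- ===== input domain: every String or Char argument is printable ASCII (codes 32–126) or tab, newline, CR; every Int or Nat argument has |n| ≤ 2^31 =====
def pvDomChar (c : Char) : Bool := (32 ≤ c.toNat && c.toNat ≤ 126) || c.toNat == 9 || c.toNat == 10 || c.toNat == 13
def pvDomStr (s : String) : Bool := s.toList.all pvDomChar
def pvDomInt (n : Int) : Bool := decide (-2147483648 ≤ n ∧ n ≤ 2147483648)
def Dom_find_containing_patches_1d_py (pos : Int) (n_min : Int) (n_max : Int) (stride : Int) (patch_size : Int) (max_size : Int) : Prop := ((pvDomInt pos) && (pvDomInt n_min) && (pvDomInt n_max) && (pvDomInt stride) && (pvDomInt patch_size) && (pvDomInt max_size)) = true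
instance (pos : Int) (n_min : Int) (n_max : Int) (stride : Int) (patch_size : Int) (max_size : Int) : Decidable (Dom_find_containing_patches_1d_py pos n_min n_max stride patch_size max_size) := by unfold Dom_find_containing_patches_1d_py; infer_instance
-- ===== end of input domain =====

-- B replaces A's linear scan over n_min..n_max by the closed-form contiguous index
-- interval computed with integer division (objective: faster, asymptotic), on the
-- natural domain of a positive stride.

-- ===== PORT A =====
def find_containing_patches_1d_py (pos : Int) (n_min : Int) (n_max : Int) (stride : Int) (patch_size : Int) (max_size : Int) : List Int × List Int :=
  (PySem.List.pyRange n_min (n_max + 1) 1).foldl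
    (fun (st : List Int × List Int) i =>
      let left := i * stride
      let right := left + patch_size
      if left ≤ pos ∧ pos < right ∧ right ≤ max_size then
        (st.1 ++ [i], st.2 ++ [pos - i * stride])
      else st)
    ([], [])

-- ===== PORT B =====
def find_containing_patches_1d_py_alt (pos : Int) (n_min : Int) (n_max : Int) (stride : Int) (patch_size : Int) (max_size : Int) : List Int × List Int :=
  let lo := max (PySem.Int.floordiv (pos - patch_size) stride + 1) n_min
  let hi := min (PySem.Int.floordiv (min pos (max_size - patch_size)) stride) n_max
  let indices := PySem.List.pyRange lo (hi + 1) 1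
  (indices, indices.map (fun i => pos - i * stride))

-- ===== PRECONDITION & SPEC =====
-- Pre_ restricts to positive stride, the natural domain of a patch stride; A also
-- returns values for zero or negative stride, but those inputs are outside the
-- function's intended use (B's floor division would even raise at stride = 0).
def Pre_find_containing_patches_1d_py (pos : Int) (n_min : Int) (n_max : Int) (stride : Int) (patch_size : Int) (max_size : Int) : Prop := 1 ≤ stride
instance (pos : Int) (n_min : Int) (n_max : Int) (stride : Int) (patch_size : Int) (max_size : Int) : Decidable (Pre_find_containing_patches_1d_py pos n_min n_max stride patch_size max_size) := by unfold Pre_find_containing_patches_1d_py; infer_instance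

def pvWitness_find_containing_patches_1d_py : Int × Int × Int × Int × Int × Int := (5, 0, 10, 2, 4, 100)

def Spec_find_containing_patches_1d_py (pos : Int) (n_min : Int) (n_max : Int) (stride : Int) (patch_size : Int) (max_size : Int) (out : List Int × List Int) : Prop := out = find_containing_patches_1d_py_alt pos n_min n_max stride patch_size max_size
instance (pos : Int) (n_min : Int) (n_max : Int) (stride : Int) (patch_size : Int) (max_size : Int) (out : List Int × List Int) : Decidable (Spec_find_containing_patches_1d_py pos n_min n_max stride patch_size max_size out) := by unfold Spec_find_containing_patches_1d_py; infer_instance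

-- ===== CLAIM (what is proved, stated in full; the proofs are below) =====
def Claim_equal_find_containing_patches_1d_py : Prop := ∀ (pos : Int) (n_min : Int) (n_max : Int) (stride : Int) (patch_size : Int) (max_size : Int), Dom_find_containing_patches_1d_py pos n_min n_max stride patch_size max_size → Pre_find_containing_patches_1d_py pos n_min n_max stride patch_size max_size → Spec_find_containing_patches_1d_py pos n_min n_max stride patch_size max_size (find_containing_patches_1d_py pos n_min n_max stride patch_size max_size)

-- ===== LEMMAS AND PROOFS =====

-- A's loop accumulates exactly (filter, map of filter).
theorem pvFoldlAcc (P : Int → Prop) [DecidablePred P] (f : Int → Int) :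
    ∀ (l : List Int) (acc1 acc2 : List Int),
      l.foldl (fun (st : List Int × List Int) i =>
        if P i then (st.1 ++ [i], st.2 ++ [f i]) else st) (acc1, acc2)
        = (acc1 ++ l.filter (fun i => decide (P i)),
           acc2 ++ (l.filter (fun i => decide (P i))).map f) := by
  intro l
  induction l with
  | nil => simp
  | cons x xs ih =>
    intro acc1 acc2
    by_cases hx : P x <;> simp [hx, ih]

-- filtering a contiguous integer range by an interval predicate is a clamped range
theorem pvFilterRange (lo hi : Int) :
    ∀ (n : Nat) (a b : Int), (b - a).toNat = n →
      (PySem.List.pyRange a b 1).filter (fun i => decide (lo ≤ i ∧ i ≤ hi))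
        = PySem.List.pyRange (max lo a) (min hi (b - 1) + 1) 1 := by
  intro n
  induction n with
  | zero =>
    intro a b hn
    rw [PySem.List.pyRange_one_eq_nil (show b ≤ a by omega)]
    rw [PySem.List.pyRange_one_eq_nil (show min hi (b - 1) + 1 ≤ max lo a by omega)]
    simp
  | succ n ih =>
    intro a b hn
    have hab : a < b := by omega
    rw [PySem.List.pyRange_one_cons hab]
    by_cases hx : lo ≤ a ∧ a ≤ hi
    · rw [List.filter_cons_of_pos (by simpa using hx), ih (a + 1) b (by omega),
        (show max lo (a + 1) = a + 1 by omega), (show max lo a = a by omega)]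
      exact (PySem.List.pyRange_one_cons (by omega)).symm
    · rw [List.filter_cons_of_neg (by simpa using hx), ih (a + 1) b (by omega)]
      rcases (show a < lo ∨ hi < a by omega) with h | h
      · congr 1
        omega
      · rw [PySem.List.pyRange_one_eq_nil (by omega), PySem.List.pyRange_one_eq_nil (by omega)]

theorem pvCondPos (pos stride patch_size max_size i : Int) (hs : 0 < stride) :
    (i * stride ≤ pos ∧ pos < i * stride + patch_size ∧ i * stride + patch_size ≤ max_size)
      ↔ (PySem.Int.floordiv (pos - patch_size) stride + 1 ≤ i
          ∧ i ≤ PySem.Int.floordiv (min pos (max_size - patch_size)) stride) := by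
  have h1 : PySem.Int.floordiv (pos - patch_size) stride < i ↔ pos - patch_size < i * stride :=
    PySem.Int.floordiv_lt_iff_lt_mul hs
  have h2 : i ≤ PySem.Int.floordiv (min pos (max_size - patch_size)) stride
      ↔ i * stride ≤ min pos (max_size - patch_size) :=
    PySem.Int.le_floordiv_iff_mul_le hs
  constructor
  · rintro ⟨ha, hb, hc⟩
    have t1 := h1.mpr (by omega)
    have t2 := h2.mpr (by omega)
    omega
  · rintro ⟨ha, hb⟩
    have t1 := h1.mp (by omega)
    have t2 := h2.mp hb
    refine ⟨by omega, by omega, by omega⟩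

-- ===== VERDICT (by name: the statement is the Claim_ definition above) =====
theorem find_containing_patches_1d_py_spec : Claim_equal_find_containing_patches_1d_py := by
  intro pos n_min n_max stride patch_size max_size _ hpre
  have hs : (0 : Int) < stride := hpre
  unfold Spec_find_containing_patches_1d_py
  unfold find_containing_patches_1d_py find_containing_patches_1d_py_alt
  rw [pvFoldlAcc (fun i => i * stride ≤ pos ∧ pos < i * stride + patch_size ∧ i * stride + patch_size ≤ max_size)
    (fun i => pos - i * stride) (PySem.List.pyRange n_min (n_max + 1) 1) [] []]
  have hfc : (PySem.List.pyRange n_min (n_max + 1) 1).filter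
      (fun i => decide (i * stride ≤ pos ∧ pos < i * stride + patch_size ∧ i * stride + patch_size ≤ max_size))
      = (PySem.List.pyRange n_min (n_max + 1) 1).filter
      (fun i => decide (PySem.Int.floordiv (pos - patch_size) stride + 1 ≤ i
          ∧ i ≤ PySem.Int.floordiv (min pos (max_size - patch_size)) stride)) :=
    List.filter_congr (fun i _ => by
      simp only [decide_eq_decide]
      exact pvCondPos pos stride patch_size max_size i hs)
  rw [hfc, pvFilterRange (PySem.Int.floordiv (pos - patch_size) stride + 1)
    (PySem.Int.floordiv (min pos (max_size - patch_size)) stride)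
    (n_max + 1 - n_min).toNat n_min (n_max + 1) rfl]
  simp [show (n_max + 1 - 1 : Int) = n_max from by omega]
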